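-- pv_equiv track=rewrite | github.com/arsen-zaharenko/algorithms | task_3/graph_algorithms.py | most_convenient_crossroads
-- ===== SOURCE A (Python) =====
-- def most_convenient_crossroads(graph: list) -> int:
-- 	crossroads = []
-- 	max_distances_list = []
--
-- 	for crossroads, distances_list in enumerate(graph):
-- 		max_distances_list.append((crossroads, max(distances_list)))
--
-- 	min_distances_list = []
-- 	min_distance = max_distances_list[0][1]
--
-- 	for crossroads in max_distances_list:
-- 		if crossroads[1] < min_distance:
-- 			min_distance = crossroads[1]
--
-- 	for crossroads in max_distances_list:
-- 		if crossroads[1] == min_distance: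
-- 			min_distances_list.append((crossroads[0], graph[crossroads[0]]))
--
-- 	return min_distance, min_distances_list
-- ===== SOURCE B (Python) =====
-- def most_convenient_crossroads(graph: list) -> int:
--     # One pass: running minimum of row maxima with reset/append of tied rows.
--     min_distance = max(graph[0])
--     result = [(0, graph[0])]
--     for i, row in enumerate(graph[1:], 1):
--         m = max(row)
--         if m < min_distance:
--             min_distance = m
--             result = [(i, row)]
--         elif m == min_distance:
--             result.append((i, row))
--     return min_distance, result
-- ===== Notes on version B (the rewrite author's own statement) =====
-- stated objective: simpler
-- what changed: Replaces A's three passes (build (index,max) list, scan for the minimum, re-scan and re-index graph to collect ties) with a single running-minimum pass over enumerate(graph) that resets or extends the result list in place.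
import Mathlib
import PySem

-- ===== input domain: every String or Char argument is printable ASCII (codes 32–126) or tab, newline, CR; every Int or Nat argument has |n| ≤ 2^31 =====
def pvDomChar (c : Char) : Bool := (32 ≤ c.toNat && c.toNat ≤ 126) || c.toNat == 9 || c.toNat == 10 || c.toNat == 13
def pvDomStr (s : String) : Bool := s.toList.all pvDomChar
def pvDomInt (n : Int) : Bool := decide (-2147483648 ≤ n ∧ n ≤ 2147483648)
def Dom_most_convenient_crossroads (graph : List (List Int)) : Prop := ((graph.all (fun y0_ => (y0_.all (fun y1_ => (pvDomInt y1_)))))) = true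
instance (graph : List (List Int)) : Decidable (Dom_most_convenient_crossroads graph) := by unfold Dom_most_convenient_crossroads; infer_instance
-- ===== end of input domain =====

-- B fuses A's three passes into one running-minimum pass over enumerate(graph); same cost, simpler.

-- ===== PORT A =====
-- Python max(list) over a nonempty list of ints; an empty list raises ValueError
-- (excluded by Pre_), the 0 default is never reached inside Pre_.
def listMax (l : List Int) : Int :=
  match l with
  | [] => 0
  | h :: t => t.foldl max h

def most_convenient_crossroads (graph : List (List Int)) : Int × (List (Int × List Int)) :=
  -- for crossroads, distances_list in enumerate(graph): append (crossroads, max(distances_list))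
  let max_distances_list :=
    (PySem.List.enumerate graph).foldl (fun acc p => acc ++ [(p.1, listMax p.2)]) []
  -- min_distance = max_distances_list[0][1]  (IndexError on empty graph; excluded by Pre_)
  let min_distance0 := ((PySem.List.pyGet? max_distances_list 0).getD (0, 0)).2
  -- for crossroads in max_distances_list: if crossroads[1] < min_distance: …
  let min_distance :=
    max_distances_list.foldl (fun m c => if c.2 < m then c.2 else m) min_distance0
  -- for crossroads in max_distances_list: if crossroads[1] == min_distance: append (crossroads[0], graph[crossroads[0]])
  let min_distances_list :=
    max_distances_list.foldl
      (fun acc c =>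
        if c.2 == min_distance then
          acc ++ [(c.1, (PySem.List.pyGet? graph c.1).getD [])]
        else acc) []
  (min_distance, min_distances_list)

-- ===== PORT B =====
def most_convenient_crossroads_alt (graph : List (List Int)) : Int × (List (Int × List Int)) :=
  match graph with
  | [] => (0, [])  -- Source B raises IndexError on graph[0] here; excluded by Pre_
  | first :: rest =>
    -- for i, row in enumerate(graph[1:], 1): running minimum with reset/append
    let st :=
      (PySem.List.enumerate rest 1).foldl
        (fun st p =>
          let m := listMax p.2
          if m < st.1 then (m, [(p.1, p.2)])
          else if m == st.1 then (st.1, st.2 ++ [(p.1, p.2)])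
          else st)
        (listMax first, [((0 : Int), first)])
    (st.1, st.2)

-- ===== PRECONDITION & SPEC =====
-- A raises IndexError on the empty graph and ValueError (max of empty) on an empty row.
def Pre_most_convenient_crossroads (graph : List (List Int)) : Prop :=
  graph ≠ [] ∧ ∀ row ∈ graph, row ≠ []
instance (graph : List (List Int)) : Decidable (Pre_most_convenient_crossroads graph) := by
  unfold Pre_most_convenient_crossroads; infer_instance

def pvWitness_most_convenient_crossroads : List (List Int) := [[0, 3], [2, 1], [3]]

def Spec_most_convenient_crossroads (graph : List (List Int)) (out : Int × (List (Int × List Int))) : Prop := out = most_convenient_crossroads_alt graph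
instance (graph : List (List Int)) (out : Int × (List (Int × List Int))) : Decidable (Spec_most_convenient_crossroads graph out) := by unfold Spec_most_convenient_crossroads; infer_instance

-- ===== CLAIM (what is proved, stated in full; the proofs are below) =====
def Claim_equal_most_convenient_crossroads : Prop := ∀ (graph : List (List Int)), Dom_most_convenient_crossroads graph → Pre_most_convenient_crossroads graph → Spec_most_convenient_crossroads graph (most_convenient_crossroads graph)

-- ===== LEMMAS AND PROOFS =====

-- Minimum of m and the row maxima of pairs (the value both loops compute).
def minMax (m : Int) (pairs : List (Int × List Int)) : Int :=
  pairs.foldl (fun a p => min a (listMax p.2)) m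

theorem minMax_le (pairs : List (Int × List Int)) : ∀ m : Int, minMax m pairs ≤ m := by
  induction pairs with
  | nil => intro m; simp [minMax]
  | cons p ps ih =>
    intro m
    have h := ih (min m (listMax p.2))
    simp only [minMax, List.foldl_cons] at *
    exact le_trans h (min_le_left _ _)

-- B's loop in closed form.
theorem bloop_spec (pairs : List (Int × List Int)) :
    ∀ (m : Int) (res : List (Int × List Int)),
      pairs.foldl
        (fun st p =>
          let mx := listMax p.2
          if mx < st.1 then (mx, [(p.1, p.2)])
          else if mx == st.1 then (st.1, st.2 ++ [(p.1, p.2)])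
          else st)
        (m, res)
      = (minMax m pairs,
         (if minMax m pairs = m then res else []) ++
           pairs.filter (fun p => listMax p.2 == minMax m pairs)) := by
  induction pairs with
  | nil => intro m res; simp [minMax]
  | cons p ps ih =>
    intro m res
    have hle := minMax_le ps (min m (listMax p.2))
    have hmm : minMax m (p :: ps) = minMax (min m (listMax p.2)) ps := by
      simp [minMax]
    rw [List.foldl_cons]
    by_cases h1 : listMax p.2 < m
    · have hmin : min m (listMax p.2) = listMax p.2 := by omega
      simp only [h1, if_pos]
      rw [ih (listMax p.2) [(p.1, p.2)], hmm, hmin]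
      have hne : minMax (listMax p.2) ps ≠ m := by
        have := minMax_le ps (listMax p.2); omega
      rw [List.filter_cons]
      by_cases h2 : listMax p.2 = minMax (listMax p.2) ps
      · rw [← h2]
        have hnm : listMax p.2 ≠ m := by omega
        simp [hnm]
      · simp [hne, h2, Ne.symm h2]
    · have hmin : min m (listMax p.2) = m := by omega
      simp only [if_neg h1]
      by_cases h2 : listMax p.2 = m
      · simp only [h2, beq_self_eq_true, if_pos]
        rw [ih m (res ++ [(p.1, p.2)]), hmm, hmin]
        rw [List.filter_cons]
        by_cases h3 : minMax m ps = m
        · subst h2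
          simp [h3, List.append_assoc]
        · have : ¬ (listMax p.2 == minMax m ps) = true := by
            simp only [beq_iff_eq]; omega
          simp [h3, this]
      · have hb : ¬ (listMax p.2 == m) = true := by simp [h2]
        simp only [hb, if_neg, Bool.false_eq_true, not_false_iff]
        rw [ih m res, hmm, hmin]
        rw [List.filter_cons]
        have hlt : m < listMax p.2 := by omega
        have hmle := minMax_le ps m
        have : ¬ (listMax p.2 == minMax m ps) = true := by
          simp only [beq_iff_eq]; omega
        simp [this]

-- indexing back into graph: an enumerated pair indexes its own row
theorem enum_pyGet (xs : List (List Int)) :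
    ∀ (pre : List (List Int)) (p : Int × List Int),
      p ∈ PySem.List.enumerate xs (pre.length : Int) →
        PySem.List.pyGet? (pre ++ xs) p.1 = some p.2 := by
  induction xs with
  | nil => intro pre p hp; simp [PySem.List.enumerate_nil] at hp
  | cons x xs ih =>
    intro pre p hp
    rw [PySem.List.enumerate_cons] at hp
    rcases List.mem_cons.mp hp with h | h
    · subst h
      simp [PySem.List.pyGet?_append_length (pre := pre) (y := x) (ys := xs)]
    · have h' : p ∈ PySem.List.enumerate xs ((pre ++ [x]).length : Int) := by
        simpa [List.length_append, add_comm] using h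
      have := ih (pre ++ [x]) p h'
      simpa [List.append_assoc] using this

-- A's min-loop equals minMax over the enumerated pairs.
theorem aMin_eq (pairs : List (Int × Int)) :
    ∀ m : Int, pairs.foldl (fun m c => if c.2 < m then c.2 else m) m
      = pairs.foldl (fun m c => min m c.2) m := by
  induction pairs with
  | nil => intro m; rfl
  | cons p ps ih =>
    intro m
    simp only [List.foldl_cons]
    rw [ih]
    congr 1
    by_cases h : p.2 < m
    · simp [h]; omega
    · simp [h]; omega

-- B's port in closed form.
theorem B_closed (first : List Int) (rest : List (List Int)) :
    most_convenient_crossroads_alt (first :: rest)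
      = (minMax (listMax first) (PySem.List.enumerate rest 1),
         (if minMax (listMax first) (PySem.List.enumerate rest 1) = listMax first then
            [((0 : Int), first)] else []) ++
           (PySem.List.enumerate rest 1).filter
             (fun p => listMax p.2 == minMax (listMax first) (PySem.List.enumerate rest 1))) := by
  simp only [most_convenient_crossroads_alt]
  rw [bloop_spec]

-- A's port in the same closed form.
theorem A_closed (first : List Int) (rest : List (List Int)) :
    most_convenient_crossroads (first :: rest)
      = (minMax (listMax first) (PySem.List.enumerate rest 1),
         (if minMax (listMax first) (PySem.List.enumerate rest 1) = listMax first then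
            [((0 : Int), first)] else []) ++
           (PySem.List.enumerate rest 1).filter
             (fun p => listMax p.2 == minMax (listMax first) (PySem.List.enumerate rest 1))) := by
  simp only [most_convenient_crossroads]
  rw [PySem.List.foldl_append_singleton_eq_map, List.nil_append]
  rw [PySem.List.enumerate_cons, List.map_cons]
  set m0 := listMax first with hm0
  set E := PySem.List.enumerate rest (0 + 1 : Int) with hE
  have hE1 : E = PySem.List.enumerate rest 1 := by rw [hE]; norm_num
  -- the initial value max_distances_list[0][1]
  have hinit :
      ((PySem.List.pyGet? (((0 : Int), m0) :: E.map (fun p => (p.1, listMax p.2))) 0).getD (0, 0)).2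
        = m0 := by
    simp
  rw [hinit]
  -- the minimum loop
  have hmin :
      (((0 : Int), m0) :: E.map (fun p => (p.1, listMax p.2))).foldl
          (fun m c => if c.2 < m then c.2 else m) m0
        = minMax m0 E := by
    rw [aMin_eq]
    simp only [List.foldl_cons, List.foldl_map]
    rw [min_self]
    rfl
  rw [hmin, hE1]
  set M := minMax m0 (PySem.List.enumerate rest 1) with hM
  -- the collection loop
  rw [PySem.List.foldl_append_if, List.nil_append]
  rw [List.filter_cons]
  have hfilt :
      List.map (fun c : Int × Int => (c.1, (PySem.List.pyGet? (first :: rest) c.1).getD []))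
        (List.filter (fun c => c.2 == M)
          (List.map (fun p : Int × List Int => (p.1, listMax p.2)) (PySem.List.enumerate rest 1)))
        = List.filter (fun p => listMax p.2 == M) (PySem.List.enumerate rest 1) := by
    rw [List.filter_map, List.map_map]
    have hcongr : ∀ p ∈ (PySem.List.enumerate rest 1).filter
        ((fun c : Int × Int => c.2 == M) ∘ fun p : Int × List Int => (p.1, listMax p.2)),
        ((fun c : Int × Int => (c.1, (PySem.List.pyGet? (first :: rest) c.1).getD [])) ∘
          fun p : Int × List Int => (p.1, listMax p.2)) p = p := by
      intro p hp
      have hpE : p ∈ PySem.List.enumerate rest 1 := (List.mem_filter.mp hp).1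
      have hget : PySem.List.pyGet? (first :: rest) p.1 = some p.2 := by
        have := enum_pyGet rest [first] p (by simpa using hpE)
        simpa using this
      simp [Function.comp, hget]
    rw [List.map_congr_left hcongr]
    simp only [List.map_id_fun', id]
    rfl
  refine congrArg (Prod.mk M) ?_
  by_cases h0 : (m0 == M) = true
  · have h0' : M = m0 := (beq_iff_eq.mp h0).symm
    rw [if_pos h0, List.map_cons, hfilt, h0', if_pos rfl]
    simp
  · have h0' : ¬ M = m0 := fun h => h0 (beq_iff_eq.mpr h.symm)
    rw [if_neg h0, hfilt, if_neg h0', List.nil_append]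

theorem most_convenient_crossroads_eq (graph : List (List Int))
    (hpre : Pre_most_convenient_crossroads graph) :
    most_convenient_crossroads graph = most_convenient_crossroads_alt graph := by
  obtain ⟨hne, -⟩ := hpre
  match graph with
  | [] => exact absurd rfl hne
  | first :: rest => rw [A_closed, B_closed]

-- ===== VERDICT (by name: the statement is the Claim_ definition above) =====
theorem most_convenient_crossroads_spec : Claim_equal_most_convenient_crossroads := by
  intro graph _ hpre
  unfold Spec_most_convenient_crossroads
  exact most_convenient_crossroads_eq graph hpre
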